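-- pv_equiv track=rewrite | github.com/seannnnnn1017/openclaw-lite | agent/skill_manifest.py | extract_intro_paragraph
-- ===== SOURCE A (Python) =====
-- def _normalize_whitespace(text: str) -> str:
--     return " ".join(str(text or "").split())
--
-- def extract_intro_paragraph(skill_content: str) -> str:
--     paragraph_lines = []
--
--     for raw_line in str(skill_content or "").splitlines():
--         line = raw_line.strip()
--         if not line:
--             if paragraph_lines:
--                 break
--             continue
--         paragraph_lines.append(line)
--
--     return _normalize_whitespace(" ".join(paragraph_lines))
-- ===== SOURCE B (Python) =====
-- def extract_intro_paragraph(skill_content: str) -> str: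
--     # segment the WHOLE document into paragraphs (each a list of words), then
--     # select the first one; no early break and no final re-normalization pass.
--     paragraphs = []
--     in_paragraph = False
--     for line in str(skill_content or "").splitlines():
--         words = line.split()
--         if not words:
--             in_paragraph = False
--         elif in_paragraph:
--             paragraphs[-1].extend(words)
--         else:
--             paragraphs.append(words)
--             in_paragraph = True
--     return " ".join(paragraphs[0]) if paragraphs else ""
-- ===== Notes on version B (the rewrite author's own statement) =====
-- stated objective: alternative
-- what changed: Replaces A's early-break first-paragraph scan with a re-split normalization pass by a full paragraph segmentation: one fold over the whole document builds the list of ALL paragraphs as word lists (grouping contiguous word-bearing lines), and the result is the first paragraph joined; no break, no strip, no second normalization.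
import Mathlib
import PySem

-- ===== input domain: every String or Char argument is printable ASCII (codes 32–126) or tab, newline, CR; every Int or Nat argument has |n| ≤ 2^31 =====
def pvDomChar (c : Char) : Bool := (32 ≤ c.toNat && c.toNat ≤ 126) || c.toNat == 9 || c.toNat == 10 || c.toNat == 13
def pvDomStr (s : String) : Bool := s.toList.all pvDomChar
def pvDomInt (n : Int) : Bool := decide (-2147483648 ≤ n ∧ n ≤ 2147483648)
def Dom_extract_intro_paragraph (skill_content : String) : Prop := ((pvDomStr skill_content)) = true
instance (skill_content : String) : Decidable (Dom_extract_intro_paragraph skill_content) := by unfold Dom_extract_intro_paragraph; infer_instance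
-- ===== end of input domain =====

-- B replaces A's early-break first-paragraph scan (plus a final re-split normalization)
-- by a full paragraph segmentation of the whole document — a fold building the list of
-- ALL paragraphs as word lists, then selecting the first; objective: alternative.

-- ===== PORT A =====
-- the for-loop of extract_intro_paragraph (state: paragraph_lines accumulator)
def pvALoop : List String → List String → List String
  | [], acc => acc
  | raw :: rest, acc =>
      let line := PySem.Str.strip raw
      if line == "" then
        (if acc.isEmpty then pvALoop rest acc else acc)
      else pvALoop rest (acc ++ [line])

def pvNormalizeWhitespace (text : String) : String :=
  PySem.Str.join " " (PySem.Str.split₀ (if text == "" then "" else text))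

def extract_intro_paragraph (skill_content : String) : String :=
  let s := if skill_content == "" then "" else skill_content
  let paragraph_lines := pvALoop (PySem.Str.splitlines s) []
  pvNormalizeWhitespace (PySem.Str.join " " paragraph_lines)

-- ===== PORT B =====
-- paragraphs[-1].extend(words): extend the LAST paragraph (the loop flag guarantees
-- the list is nonempty there; the [] case is unreachable)
def pvExtendLast {α : Type} : List (List α) → List α → List (List α)
  | [], w => [w]
  | [p], w => [p ++ w]
  | p :: q :: r, w => p :: pvExtendLast (q :: r) w

-- the for-loop of Source B (state: paragraphs, in_paragraph)
def pvBLoop : List String → List (List String) → Bool → List (List String)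
  | [], ps, _ => ps
  | line :: rest, ps, inp =>
      let words := PySem.Str.split₀ line
      if words.isEmpty then pvBLoop rest ps false
      else if inp then pvBLoop rest (pvExtendLast ps words) true
      else pvBLoop rest (ps ++ [words]) true

def extract_intro_paragraph_alt (skill_content : String) : String :=
  let paragraphs := pvBLoop (PySem.Str.splitlines (if skill_content == "" then "" else skill_content)) [] false
  match paragraphs with
  | [] => ""
  | p :: _ => PySem.Str.join " " p

-- ===== PRECONDITION & SPEC =====
def Spec_extract_intro_paragraph (skill_content : String) (out : String) : Prop := out = extract_intro_paragraph_alt skill_content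
instance (skill_content : String) (out : String) : Decidable (Spec_extract_intro_paragraph skill_content out) := by unfold Spec_extract_intro_paragraph; infer_instance

-- ===== CLAIM (what is proved, stated in full; the proofs are below) =====
def Claim_equal_extract_intro_paragraph : Prop := ∀ (skill_content : String), Dom_extract_intro_paragraph skill_content → Spec_extract_intro_paragraph skill_content (extract_intro_paragraph skill_content)

-- ===== LEMMAS AND PROOFS =====

-- reference word splitter: what Python's str.split() computes
def pvWords : List Char → List (List Char)
  | [] => []
  | c :: cs =>
      if PySem.Chars.isspace c then pvWords cs
      else (c :: cs.takeWhile (fun d => !PySem.Chars.isspace d)) ::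
           pvWords (cs.dropWhile (fun d => !PySem.Chars.isspace d))
termination_by l => l.length
decreasing_by
  · simp
  · simpa using Nat.lt_succ_of_le (List.length_dropWhile_le _ _)

theorem pvWords_block (cur : List Char) (hne : cur ≠ [])
    (h : ∀ c ∈ cur, PySem.Chars.isspace c = false) : pvWords cur = [cur] := by
  match cur with
  | [] => exact absurd rfl hne
  | c :: cs =>
    rw [pvWords]
    rw [h c (by simp)]
    simp only [Bool.false_eq_true, if_false]
    rw [List.takeWhile_eq_self_iff.mpr, List.dropWhile_eq_nil_iff.mpr, pvWords]
    · intro x hx; simp [h x (List.mem_cons_of_mem _ hx)]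
    · intro x hx; simp [h x (List.mem_cons_of_mem _ hx)]

theorem pvWords_nil_of_spaces (l : List Char) (h : ∀ c ∈ l, PySem.Chars.isspace c = true) :
    pvWords l = [] := by
  induction l with
  | nil => simp [pvWords]
  | cons c cs ih =>
    rw [pvWords, if_pos (h c (by simp))]
    exact ih (fun x hx => h x (List.mem_cons_of_mem _ hx))

theorem pvWords_split : ∀ (a b : List Char) (c : Char), PySem.Chars.isspace c = true →
    pvWords (a ++ c :: b) = pvWords a ++ pvWords b
  | [], b, c, h => by simp [pvWords, h]
  | d :: a', b, c, h => by
    by_cases hd : PySem.Chars.isspace d = true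
    · show pvWords (d :: (a' ++ c :: b)) = pvWords (d :: a') ++ pvWords b
      rw [pvWords, if_pos hd, pvWords, if_pos hd]
      exact pvWords_split a' b c h
    · show pvWords (d :: (a' ++ c :: b)) = pvWords (d :: a') ++ pvWords b
      rw [pvWords, if_neg hd, pvWords, if_neg hd]
      by_cases hall : ∀ x ∈ a', (!PySem.Chars.isspace x) = true
      · have htake : List.takeWhile (fun d => !PySem.Chars.isspace d) a' = a' :=
          List.takeWhile_eq_self_iff.mpr hall
        have hdrop : List.dropWhile (fun d => !PySem.Chars.isspace d) a' = [] :=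
          List.dropWhile_eq_nil_iff.mpr hall
        rw [List.takeWhile_append, List.dropWhile_append]
        rw [htake, hdrop]
        simp only [List.isEmpty_nil, if_pos]
        have : List.takeWhile (fun d => !PySem.Chars.isspace d) (c :: b) = [] := by
          simp [h]
        rw [this, List.append_nil]
        have : List.dropWhile (fun d => !PySem.Chars.isspace d) (c :: b) = c :: b := by
          simp [h]
        rw [this]
        simp [pvWords, h]
      · have hne : List.dropWhile (fun d => !PySem.Chars.isspace d) a' ≠ [] := by
          intro hc; exact hall (List.dropWhile_eq_nil_iff.mp hc)
        have hlt : (List.takeWhile (fun d => !PySem.Chars.isspace d) a').length ≠ a'.length := by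
          intro hc
          have heq : List.takeWhile (fun d => !PySem.Chars.isspace d) a' = a' :=
            (List.takeWhile_sublist _).eq_of_length hc
          exact hall (List.takeWhile_eq_self_iff.mp heq)
        rw [List.takeWhile_append, List.dropWhile_append]
        rw [if_neg hlt, if_neg (by simpa using hne)]
        rw [pvWords_split (List.dropWhile (fun d => !PySem.Chars.isspace d) a') b c h]
        simp
termination_by a _ _ _ => a.length
decreasing_by
  · simp
  · simp only [List.length_cons]
    exact Nat.lt_succ_of_le (List.length_dropWhile_le _ _)

theorem pvGo_spec (s : List Char) : ∀ cur acc, (∀ c ∈ cur, PySem.Chars.isspace c = false) →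
    PySem.Chars.split₀.go s cur acc = acc.reverse ++ pvWords (cur.reverse ++ s) := by
  induction s with
  | nil =>
    intro cur acc h
    rw [PySem.Chars.split₀.go]
    by_cases hc : cur = []
    · subst hc; simp [pvWords]
    · rw [if_neg (by simpa using hc), List.append_nil,
        pvWords_block cur.reverse (by simpa using hc) (fun c hcm => h c (by simpa using hcm))]
      simp
  | cons c rest ih =>
    intro cur acc h
    rw [PySem.Chars.split₀.go]
    by_cases hs : PySem.Chars.isspace c = true
    · rw [if_pos hs]
      by_cases hc : cur = []
      · subst hc
        rw [if_pos List.isEmpty_nil, ih [] acc (by simp)]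
        rw [List.reverse_nil, List.nil_append, List.nil_append, pvWords, if_pos hs]
      · rw [if_neg (by simpa using hc), ih [] (cur.reverse :: acc) (by simp),
          pvWords_split cur.reverse rest c hs,
          pvWords_block cur.reverse (by simpa using hc) (fun x hx => h x (by simpa using hx))]
        simp
    · rw [if_neg hs]
      rw [ih (c :: cur) acc ?_]
      · simp
      · intro x hx
        rcases List.mem_cons.mp hx with h1 | h2
        · subst h1; simpa using hs
        · exact h x h2

theorem pvSplit₀_eq_words (s : List Char) : PySem.Chars.split₀ s = pvWords s := by
  rw [PySem.Chars.split₀, pvGo_spec s [] [] (by simp)]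
  simp

theorem pvWords_append_spaces (a b : List Char) (h : ∀ c ∈ b, PySem.Chars.isspace c = true) :
    pvWords (a ++ b) = pvWords a := by
  match b with
  | [] => simp
  | c :: b' =>
    rw [pvWords_split a b' c (h c (by simp)),
      pvWords_nil_of_spaces b' (fun x hx => h x (List.mem_cons_of_mem _ hx))]
    simp

theorem pvWords_lstrip (l : List Char) : pvWords (List.dropWhile PySem.Chars.isspace l) = pvWords l := by
  induction l with
  | nil => rfl
  | cons c cs ih =>
    by_cases hs : PySem.Chars.isspace c = true
    · rw [List.dropWhile_cons_of_pos hs, ih, pvWords, if_pos hs]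
    · rw [List.dropWhile_cons_of_neg hs]

theorem pvWords_strip (l : List Char) : pvWords (PySem.Chars.strip l) = pvWords l := by
  rw [PySem.Chars.strip, PySem.Chars.rstrip, PySem.Chars.lstrip]
  have key : ∀ y : List Char,
      pvWords (List.dropWhile PySem.Chars.isspace y.reverse).reverse = pvWords y := by
    intro y
    conv_rhs => rw [← y.reverse_reverse, ← List.takeWhile_append_dropWhile
      (p := PySem.Chars.isspace) (l := y.reverse)]
    rw [List.reverse_append]
    rw [pvWords_append_spaces _ _ (fun x hx => List.mem_takeWhile_imp (by simpa using hx))]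
  rw [key, pvWords_lstrip]

theorem pvWords_eq_nil_iff (l : List Char) : pvWords l = [] ↔ ∀ c ∈ l, PySem.Chars.isspace c = true := by
  constructor
  · intro h
    induction l with
    | nil => simp
    | cons c cs ih =>
      rw [pvWords] at h
      by_cases hs : PySem.Chars.isspace c = true
      · rw [if_pos hs] at h
        intro x hx
        rcases List.mem_cons.mp hx with h1 | h2
        · subst h1; exact hs
        · exact ih h x h2
      · rw [if_neg hs] at h; exact absurd h (by simp)
  · exact pvWords_nil_of_spaces l

theorem pvStrip_nil_iff (l : List Char) : PySem.Chars.strip l = [] ↔ pvWords l = [] := by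
  constructor
  · intro h
    rw [← pvWords_strip l, h]; simp [pvWords]
  · intro h
    have hall := (pvWords_eq_nil_iff l).mp h
    rw [PySem.Chars.strip, PySem.Chars.lstrip,
      List.dropWhile_eq_nil_iff.mpr hall]
    rfl

theorem pvWords_join (parts : List (List Char)) :
    pvWords (PySem.Chars.join [' '] parts) = (parts.map pvWords).flatten := by
  induction parts with
  | nil => simp [PySem.Chars.join, List.intercalate, pvWords]
  | cons x r ih =>
    match r with
    | [] => simp [PySem.Chars.join, List.intercalate]
    | y :: r' =>
      have hj : PySem.Chars.join [' '] (x :: y :: r') =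
          x ++ ' ' :: PySem.Chars.join [' '] (y :: r') := by
        simp [PySem.Chars.join, List.intercalate, List.intersperse]
      rw [hj, pvWords_split x _ ' ' (by decide), ih]
      simp

-- ---- proof-side reference functions: the first paragraph at word level ----
def pvDropB {α : Type} : List (List α) → List (List α)
  | [] => []
  | w :: r => if w.isEmpty then pvDropB r else w :: r

def pvTakeB {α : Type} : List (List α) → List α
  | [] => []
  | w :: r => if w.isEmpty then [] else w ++ pvTakeB r

-- generic (word-level) version of B's loop
def pvGLoop {α : Type} : List (List α) → List (List α) → Bool → List (List α)
  | [], ps, _ => ps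
  | w :: rest, ps, inp =>
      if w.isEmpty then pvGLoop rest ps false
      else if inp then pvGLoop rest (pvExtendLast ps w) true
      else pvGLoop rest (ps ++ [w]) true

theorem pvExtendLast_map {α β : Type} (g : α → β) : ∀ (ps : List (List α)) (w : List α),
    (pvExtendLast ps w).map (List.map g) = pvExtendLast (ps.map (List.map g)) (w.map g)
  | [], w => by simp [pvExtendLast]
  | [p], w => by simp [pvExtendLast]
  | p :: q :: r, w => by
    simp only [pvExtendLast, List.map_cons]
    rw [pvExtendLast_map g (q :: r) w]
    rfl

-- pvBLoop under toList is pvGLoop on the lines' word lists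
theorem pvBLoop_toList (ls : List String) : ∀ (ps : List (List String)) (b : Bool),
    (pvBLoop ls ps b).map (List.map String.toList) =
      pvGLoop (ls.map (fun s => pvWords s.toList)) (ps.map (List.map String.toList)) b := by
  induction ls with
  | nil => intro ps b; rfl
  | cons line rest ih =>
    intro ps b
    rw [pvBLoop, List.map_cons, pvGLoop]
    have hw : (PySem.Str.split₀ line).map String.toList = pvWords line.toList := by
      rw [PySem.Str.split₀_map_toList, pvSplit₀_eq_words]
    have hemp : (PySem.Str.split₀ line).isEmpty = (pvWords line.toList).isEmpty := by
      rw [← hw]; cases PySem.Str.split₀ line <;> rfl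
    by_cases he : (PySem.Str.split₀ line).isEmpty = true
    · have he2 : (pvWords line.toList).isEmpty = true := hemp ▸ he
      rw [if_pos he, if_pos he2, ih]
    · have he2 : ¬(pvWords line.toList).isEmpty = true := fun hc => he (by rw [hemp]; exact hc)
      rw [if_neg he, if_neg he2]
      cases b with
      | true =>
        rw [if_pos rfl, if_pos rfl, ih, pvExtendLast_map, hw]
      | false =>
        rw [if_neg (by simp), if_neg (by simp), ih, List.map_append, List.map_cons, List.map_nil, hw]

theorem pvExtendLast_ne_nil {α : Type} : ∀ (ps : List (List α)) (w : List α), pvExtendLast ps w ≠ []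
  | [], w => by simp [pvExtendLast]
  | [p], w => by simp [pvExtendLast]
  | p :: q :: r, w => by simp [pvExtendLast]

-- once the first paragraph is closed (or two paragraphs exist), the head is stable
theorem pvGLoop_head_stable {α : Type} : ∀ (l : List (List α)) (p : List α) (q : List (List α)) (b : Bool),
    (b = true → q ≠ []) → (pvGLoop l (p :: q) b).head? = some p := by
  intro l
  induction l with
  | nil => intro p q b _; rfl
  | cons w rest ih =>
    intro p q b hb
    rw [pvGLoop]
    by_cases he : w.isEmpty = true
    · rw [if_pos he]; exact ih p q false (by simp)
    · rw [if_neg he]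
      cases b with
      | true =>
        rw [if_pos rfl]
        match q, hb rfl with
        | q1 :: q2, _ =>
          have hdef : pvExtendLast (p :: q1 :: q2) w = p :: pvExtendLast (q1 :: q2) w := rfl
          rw [hdef]
          exact ih p _ true (fun _ => pvExtendLast_ne_nil _ _)
      | false =>
        simp only [Bool.false_eq_true, if_false]
        exact ih p (q ++ [w]) true (by simp)

-- while inside the (single) first paragraph, its words accumulate like pvTakeB
theorem pvGLoop_collect {α : Type} : ∀ (l : List (List α)) (cur : List α),
    (pvGLoop l [cur] true).head? = some (cur ++ pvTakeB l) := by
  intro l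
  induction l with
  | nil => intro cur; simp [pvGLoop, pvTakeB]
  | cons w rest ih =>
    intro cur
    rw [pvGLoop, pvTakeB]
    by_cases he : w.isEmpty = true
    · rw [if_pos he, if_pos he]
      rw [pvGLoop_head_stable rest cur [] false (by simp)]
      simp
    · rw [if_neg he, if_neg he, if_pos rfl]
      show (pvGLoop rest [cur ++ w] true).head? = _
      rw [ih (cur ++ w)]
      simp

-- B-loop head paragraph = pvTakeB ∘ pvDropB
theorem pvGLoop_first {α : Type} : ∀ (l : List (List α)),
    (match pvGLoop l [] false with
      | [] => ([] : List α)
      | p :: _ => p) = pvTakeB (pvDropB l) := by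
  intro l
  induction l with
  | nil => rfl
  | cons w rest ih =>
    rw [pvGLoop, pvDropB]
    by_cases he : w.isEmpty = true
    · rw [if_pos he, if_pos he]
      exact ih
    · rw [if_neg he, if_neg he]
      simp only [Bool.false_eq_true, if_false, List.nil_append]
      rw [pvTakeB, if_neg he]
      have hc := pvGLoop_collect rest w
      match h : pvGLoop rest [w] true with
      | [] => rw [h] at hc; simp at hc
      | p :: t => rw [h] at hc; simpa using hc

-- blank-line test bridge: Python's `not line.strip()` ↔ the line has no words
theorem pvStripBeq (raw : String) :
    (PySem.Str.strip raw == "") = (pvWords raw.toList).isEmpty := by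
  rcases h : (PySem.Str.strip raw == "") with _ | _
  · rcases h2 : (pvWords raw.toList).isEmpty with _ | _
    · rfl
    · exfalso
      have : PySem.Chars.strip raw.toList = [] :=
        (pvStrip_nil_iff raw.toList).mpr (by simpa using h2)
      have : PySem.Str.strip raw = "" := by
        rw [PySem.Str.strip, this]
      simp [this] at h
  · have hs : PySem.Str.strip raw = "" := eq_of_beq h
    have : PySem.Chars.strip raw.toList = [] := by
      rw [← PySem.Str.toList_strip, hs]; rfl
    have := (pvStrip_nil_iff raw.toList).mp this
    simp [this]

-- A's loop at word level equals pvTakeB ∘ pvDropB (first-paragraph words)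
theorem pvCollect (rest : List String) : ∀ acc : List String, acc ≠ [] →
    ((pvALoop rest acc).map (fun s => pvWords s.toList)).flatten =
      (acc.map (fun s => pvWords s.toList)).flatten ++ pvTakeB (rest.map (fun s => pvWords s.toList)) := by
  induction rest with
  | nil => intro acc h; simp [pvALoop, pvTakeB]
  | cons raw r ih =>
    intro acc hacc
    rw [pvALoop]
    by_cases hw : (pvWords raw.toList).isEmpty = true
    · rw [if_pos (by rw [pvStripBeq]; exact hw), if_neg (by simpa using hacc)]
      rw [List.map_cons, pvTakeB, if_pos hw]
      simp
    · rw [if_neg (by rw [pvStripBeq]; exact hw)]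
      rw [ih (acc ++ [PySem.Str.strip raw]) (by simp)]
      rw [List.map_cons, pvTakeB, if_neg hw]
      simp [PySem.Str.toList_strip, pvWords_strip]

theorem pvMain (ls : List String) :
    ((pvALoop ls []).map (fun s => pvWords s.toList)).flatten =
      pvTakeB (pvDropB (ls.map (fun s => pvWords s.toList))) := by
  induction ls with
  | nil => rfl
  | cons raw r ih =>
    rw [pvALoop, List.map_cons, pvDropB]
    by_cases hw : (pvWords raw.toList).isEmpty = true
    · rw [if_pos (by rw [pvStripBeq]; exact hw), if_pos List.isEmpty_nil, if_pos hw]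
      exact ih
    · rw [if_neg (by rw [pvStripBeq]; exact hw), if_neg hw]
      rw [List.nil_append, pvCollect r [PySem.Str.strip raw] (by simp)]
      rw [pvTakeB, if_neg hw]
      simp [PySem.Str.toList_strip, pvWords_strip]

theorem pvIfEmpty (t : String) : (if t == "" then "" else t) = t := by
  split
  · next h => exact (eq_of_beq h).symm
  · rfl

-- ===== VERDICT (by name: the statement is the Claim_ definition above) =====
theorem extract_intro_paragraph_spec : Claim_equal_extract_intro_paragraph := by
  intro sc _
  simp only [Spec_extract_intro_paragraph, extract_intro_paragraph, extract_intro_paragraph_alt,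
    pvNormalizeWhitespace]
  set ls := PySem.Str.splitlines (if sc == "" then "" else sc) with hls
  rw [pvIfEmpty]
  have hsp : (" " : String).toList = [' '] := rfl
  have hAside : PySem.Str.join " " (PySem.Str.split₀ (PySem.Str.join " " (pvALoop ls []))) =
      String.ofList (PySem.Chars.join [' ']
        (pvTakeB (pvDropB (ls.map (fun s => pvWords s.toList))))) := by
    rw [PySem.Str.join, PySem.Str.join, hsp]
    refine congrArg String.ofList (congrArg (PySem.Chars.join [' ']) ?_)
    rw [PySem.Str.split₀_map_toList, String.toList_ofList, pvSplit₀_eq_words, pvWords_join,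
      List.map_map]
    simpa [Function.comp_def] using pvMain ls
  rw [hAside]
  have hmap := pvBLoop_toList ls [] false
  simp only [List.map_nil] at hmap
  have hfirst := pvGLoop_first (ls.map (fun s => pvWords s.toList))
  match h : pvBLoop ls [] false with
  | [] =>
    rw [h] at hmap
    simp only [List.map_nil] at hmap
    rw [← hmap] at hfirst
    simp only [] at hfirst
    rw [← hfirst]
    rfl
  | p :: rest =>
    rw [h] at hmap
    simp only [List.map_cons] at hmap
    rw [← hmap] at hfirst
    simp only [] at hfirst
    rw [← hfirst]
    show String.ofList (PySem.Chars.join [' '] (List.map String.toList p)) = PySem.Str.join " " p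
    rw [PySem.Str.join, hsp]
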